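-- pv_equiv track=rewrite | github.com/ctirou/probabilistic-SRT | test.py | get_session_starts
-- ===== SOURCE A (Python) =====
-- def get_session_starts(blocks_in_session, trials_in_block):
--     """Return with a list of numbers indicating the first trials of the different sessions."""
--
--     sessionstarts = None
--
--     if sessionstarts == None:
--         sessionstarts = [1]
--         epochs_cumulative = []
--         session_no = 0
--         e_temp = 0
--         for e in range(blocks_in_session):
--             e_temp += e
--             session_no += 1
--             epochs_cumulative.append(e_temp)
--
--         for e in epochs_cumulative:
--             sessionstarts.append(e * trials_in_block * blocks_in_session+ 1)
--
--         del sessionstarts[0]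
--
--     return sessionstarts
-- ===== SOURCE B (Python) =====
-- def get_session_starts(blocks_in_session, trials_in_block):
--     """Return with a list of numbers indicating the first trials of the different sessions."""
--     # Closed form: the cumulative sum 0+1+...+i is the triangular number i*(i+1)//2,
--     # so each session start is emitted directly, with no running accumulator.
--     return [i * (i + 1) // 2 * trials_in_block * blocks_in_session + 1
--             for i in range(blocks_in_session)]
-- ===== Notes on version B (the rewrite author's own statement) =====
-- stated objective: simpler
-- what changed: Replaces A's two-pass accumulator structure (build epochs_cumulative with a running sum, then map it, then delete the leading sentinel 1) by a single comprehension emitting each start directly from the closed-form triangular number i*(i+1)//2.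
import Mathlib
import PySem

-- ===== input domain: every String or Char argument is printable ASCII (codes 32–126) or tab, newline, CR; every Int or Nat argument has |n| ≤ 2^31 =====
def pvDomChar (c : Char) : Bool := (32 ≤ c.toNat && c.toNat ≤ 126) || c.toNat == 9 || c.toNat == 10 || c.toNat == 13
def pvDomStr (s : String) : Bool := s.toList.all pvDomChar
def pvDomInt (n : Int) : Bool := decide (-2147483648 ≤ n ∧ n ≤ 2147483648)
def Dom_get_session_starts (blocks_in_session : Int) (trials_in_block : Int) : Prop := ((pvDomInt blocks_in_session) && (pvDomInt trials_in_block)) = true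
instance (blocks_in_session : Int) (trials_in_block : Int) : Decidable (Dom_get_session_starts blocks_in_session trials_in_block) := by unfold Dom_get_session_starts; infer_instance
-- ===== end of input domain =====

-- B replaces A's accumulator-threaded two-pass construction by a single map using the
-- closed-form triangular number i*(i+1)//2 (objective: simpler).


-- ===== PORT A =====
def get_session_starts (blocks_in_session : Int) (trials_in_block : Int) : List Int :=
  -- first loop: state (epochs_cumulative, session_no, e_temp)
  let st := (PySem.List.pyRange 0 blocks_in_session 1).foldl
      (fun (st : List Int × Int × Int) e =>
        (st.1 ++ [st.2.2 + e], st.2.1 + 1, st.2.2 + e)) ([], 0, 0)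
  -- second loop: sessionstarts starts as [1], appends e*trials_in_block*blocks_in_session+1
  let sessionstarts := st.1.foldl
      (fun acc e => acc ++ [e * trials_in_block * blocks_in_session + 1]) [1]
  -- del sessionstarts[0]: the list is always nonempty (it starts with 1), so this is .tail
  sessionstarts.tail

-- ===== PORT B =====
def get_session_starts_alt (blocks_in_session : Int) (trials_in_block : Int) : List Int :=
  (PySem.List.pyRange 0 blocks_in_session 1).map
    (fun i => PySem.Int.floordiv (i * (i + 1)) 2 * trials_in_block * blocks_in_session + 1)

-- ===== PRECONDITION & SPEC =====
def Spec_get_session_starts (blocks_in_session : Int) (trials_in_block : Int) (out : List Int) : Prop := out = get_session_starts_alt blocks_in_session trials_in_block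
instance (blocks_in_session : Int) (trials_in_block : Int) (out : List Int) : Decidable (Spec_get_session_starts blocks_in_session trials_in_block out) := by unfold Spec_get_session_starts; infer_instance

-- ===== CLAIM (what is proved, stated in full; the proofs are below) =====
def Claim_equal_get_session_starts : Prop := ∀ (blocks_in_session : Int) (trials_in_block : Int), Dom_get_session_starts blocks_in_session trials_in_block → Spec_get_session_starts blocks_in_session trials_in_block (get_session_starts blocks_in_session trials_in_block)

-- ===== LEMMAS AND PROOFS =====

-- proof-only helper: the running sum of A's first loop, S n = 0 + 1 + ... + (n-1)
def pvS : Nat → Nat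
  | 0 => 0
  | n + 1 => pvS n + n

theorem pvS_two_mul (n : Nat) : 2 * pvS n = n * (n - 1) := by
  induction n with
  | zero => rfl
  | succ m ih =>
    cases m with
    | zero => rfl
    | succ k =>
      simp only [pvS] at *
      rw [Nat.mul_add, ih]
      simp only [Nat.add_sub_cancel]
      ring

-- the first loop of A over range n: epochs_cumulative holds the running sums
theorem pvA_loop1 (n : Nat) :
    ((List.range n).map (fun k : Nat => (k : Int))).foldl
      (fun (st : List Int × Int × Int) e =>
        (st.1 ++ [st.2.2 + e], st.2.1 + 1, st.2.2 + e)) ([], 0, 0)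
    = ((List.range n).map (fun k => ((pvS (k + 1) : Nat) : Int)),
       (n : Int), ((pvS n : Nat) : Int)) := by
  induction n with
  | zero => simp [pvS]
  | succ m ih =>
    rw [List.range_succ, List.map_append, List.foldl_append, ih]
    simp only [List.map_cons, List.map_nil, List.foldl_cons, List.foldl_nil,
      List.map_append, pvS]
    refine Prod.ext_iff.mpr ⟨?_, Prod.ext_iff.mpr ⟨by push_cast; ring, by push_cast; ring⟩⟩
    dsimp only
    congr 1

-- the second loop of A is a map appended to the initial list
theorem pvA_loop2 (g : Int → Int) (l : List Int) (init : List Int) :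
    l.foldl (fun acc e => acc ++ [g e]) init = init ++ l.map g := by
  induction l generalizing init with
  | nil => simp
  | cons x xs ih => simp [ih]

-- B's closed form is exactly the running sum
theorem pv_tri (k : Nat) :
    PySem.Int.floordiv ((k : Int) * ((k : Int) + 1)) 2 = ((pvS (k + 1) : Nat) : Int) := by
  have h1 : ((k : Int) * ((k : Int) + 1)) = (((k * (k + 1) : Nat)) : Int) := by push_cast; ring
  have h2 : PySem.Int.floordiv (((k * (k + 1) : Nat) : Int)) (((2 : Nat) : Int))
      = ((k * (k + 1) / 2 : Nat) : Int) := PySem.Int.floordiv_natCast _ _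
  have h3 : 2 * pvS (k + 1) = (k + 1) * k := pvS_two_mul (k + 1)
  have h4 : k * (k + 1) / 2 = pvS (k + 1) := by
    have : k * (k + 1) = (k + 1) * k := by ring
    omega
  rw [h1, show ((2 : Int)) = ((2 : Nat) : Int) from rfl, h2, h4]

theorem get_session_starts_eq (b t : Int) :
    get_session_starts b t = get_session_starts_alt b t := by
  unfold get_session_starts get_session_starts_alt
  rw [PySem.List.pyRange_one]
  simp only [sub_zero, zero_add]
  rw [pvA_loop1, pvA_loop2]
  simp only [List.tail_cons, List.map_map, List.cons_append, List.nil_append]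
  refine List.map_congr_left (fun k _ => ?_)
  simp only [Function.comp, pv_tri]

-- ===== VERDICT (by name: the statement is the Claim_ definition above) =====
theorem get_session_starts_spec : Claim_equal_get_session_starts := by
  intro b t _
  exact get_session_starts_eq b t
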